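-- pv_equiv track=rewrite | github.com/romielmellizacomputo/centralized-docs-system | team-cds/update_tc_review.py | find_relevant_label
-- ===== SOURCE A (Python) =====
-- LABELS_TO_PROCESS = [
--     "To Do", "Doing", "Changes Requested",
--     "Manual QA For Review", "QA Lead For Review",
--     "Automation QA For Review", "Done", "On Hold", "Deprecated",
--     "Automation Team For Review",
-- ]
--
-- def find_relevant_label(labels_str):
--     """Find the first relevant label from the labels string"""
--     if not labels_str:
--         return None
--
--     labels_list = [label.strip() for label in str(labels_str).split(',')]
--
--     for label in LABELS_TO_PROCESS:
--         if label in labels_list: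
--             return label
--
--     return None
-- ===== SOURCE B (Python) =====
-- LABELS_TO_PROCESS = [
--     "To Do", "Doing", "Changes Requested",
--     "Manual QA For Review", "QA Lead For Review",
--     "Automation QA For Review", "Done", "On Hold", "Deprecated",
--     "Automation Team For Review",
-- ]
--
--
-- def find_relevant_label(labels_str):
--     """Single pass over the input labels, tracking the lowest priority rank seen."""
--     if not labels_str:
--         return None
--     rank = {label: i for i, label in enumerate(LABELS_TO_PROCESS)}
--     best = None
--     for part in str(labels_str).split(','):
--         r = rank.get(part.strip())
--         if r is not None and (best is None or r < best):
--             best = r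
--     return None if best is None else LABELS_TO_PROCESS[best]
-- ===== Notes on version B (the rewrite author's own statement) =====
-- stated objective: alternative
-- what changed: B makes one pass over the input labels with a precomputed label-to-priority dict, maintaining the minimum rank seen, instead of A's scan over the priority list with a list-membership test per priority.
import Mathlib
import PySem

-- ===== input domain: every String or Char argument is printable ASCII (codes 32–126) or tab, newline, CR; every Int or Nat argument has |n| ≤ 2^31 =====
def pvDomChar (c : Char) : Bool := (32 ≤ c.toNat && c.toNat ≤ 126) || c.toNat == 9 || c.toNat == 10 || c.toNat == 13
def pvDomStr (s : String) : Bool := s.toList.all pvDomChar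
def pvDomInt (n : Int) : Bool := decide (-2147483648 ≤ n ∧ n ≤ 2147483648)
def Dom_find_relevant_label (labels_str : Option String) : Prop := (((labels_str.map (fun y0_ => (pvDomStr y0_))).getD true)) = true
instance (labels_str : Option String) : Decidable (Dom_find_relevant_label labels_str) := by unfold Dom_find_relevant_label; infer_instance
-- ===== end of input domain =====

-- B replaces A's scan over the priority list (one list-membership test per priority) by a single
-- pass over the input labels with a precomputed label→rank dict, keeping the minimum rank seen.

-- LABELS_TO_PROCESS (module constant shared by both programs)
def pvLabels : List String :=
  ["To Do", "Doing", "Changes Requested", "Manual QA For Review", "QA Lead For Review",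
   "Automation QA For Review", "Done", "On Hold", "Deprecated", "Automation Team For Review"]

-- ===== PORT A =====
def find_relevant_label (labels_str : Option String) : Option String :=
  match labels_str with
  | none => none
  | some s =>
    if s = "" then none  -- `if not labels_str` is also taken for the empty string
    else
      let labels_list := ((PySem.Str.split? s ",").getD []).map PySem.Str.strip
      pvLabels.find? (fun label => labels_list.contains label)

-- ===== PORT B =====
-- rank = {label: i for i, label in enumerate(LABELS_TO_PROCESS)}
def pvRank : PySem.Dict String Int :=
  PySem.Dict.ofList ((PySem.List.enumerate pvLabels).map (fun p => (p.2, p.1)))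

-- loop body: r = rank.get(part.strip()); if r is not None and (best is None or r < best): best = r
def pvStep (best : Option Int) (part : String) : Option Int :=
  match pvRank.get? (PySem.Str.strip part) with
  | none => best
  | some r =>
    match best with
    | none => some r
    | some b => if r < b then some r else best

def find_relevant_label_alt (labels_str : Option String) : Option String :=
  match labels_str with
  | none => none
  | some s =>
    if s = "" then none
    else
      match ((PySem.Str.split? s ",").getD []).foldl pvStep none with
      | none => none
      | some b => some (PySem.List.pyGetD pvLabels b "")  -- LABELS_TO_PROCESS[best]; best is always in range

-- ===== PRECONDITION & SPEC =====
def Spec_find_relevant_label (labels_str : Option String) (out : Option String) : Prop := out = find_relevant_label_alt labels_str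
instance (labels_str : Option String) (out : Option String) : Decidable (Spec_find_relevant_label labels_str out) := by unfold Spec_find_relevant_label; infer_instance

-- ===== CLAIM (what is proved, stated in full; the proofs are below) =====
def Claim_equal_find_relevant_label : Prop := ∀ (labels_str : Option String), Dom_find_relevant_label labels_str → Spec_find_relevant_label labels_str (find_relevant_label labels_str)

-- ===== LEMMAS AND PROOFS =====

-- the option-minimum the loop accumulates, as a binary operation
def optMin (a b : Option Int) : Option Int :=
  match b with
  | none => a
  | some r =>
    match a with
    | none => some r
    | some x => if r < x then some r else a

theorem pvStep_eq (best : Option Int) (part : String) :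
    pvStep best part = optMin best (pvRank.get? (PySem.Str.strip part)) := by
  cases h : pvRank.get? (PySem.Str.strip part) <;> simp [pvStep, optMin, h]

theorem optMin_none_left (b : Option Int) : optMin none b = b := by cases b <;> rfl

theorem optMin_none_right (a : Option Int) : optMin a none = a := rfl

theorem optMin_some_some (x r : Int) : optMin (some x) (some r) = some (min r x) := by
  simp only [optMin, min_def]
  split_ifs
  all_goals first | rfl | (exfalso; omega) | (congr 1; omega)

theorem optMin_assoc (a b c : Option Int) : optMin (optMin a b) c = optMin a (optMin b c) := by
  cases a <;> cases b <;> cases c <;>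
    simp only [optMin_none_left, optMin_none_right, optMin_some_some]
  all_goals first | rfl | (congr 1; omega)

theorem fold_shift (ps : List String) (acc : Option Int) :
    ps.foldl pvStep acc = optMin acc (ps.foldl pvStep none) := by
  induction ps generalizing acc with
  | nil => cases acc <;> rfl
  | cons p ps ih =>
    simp only [List.foldl_cons]
    rw [ih (pvStep acc p), ih (pvStep none p), pvStep_eq, pvStep_eq, optMin_none_left, optMin_assoc]

-- A's search, and its unfolding to a nested conditional over memberships
def afind (ys : List String) : Option String := pvLabels.find? (fun label => ys.contains label)

def afindIf (ys : List String) : Option String :=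
  if "To Do" ∈ ys then some "To Do" else if "Doing" ∈ ys then some "Doing"
  else if "Changes Requested" ∈ ys then some "Changes Requested"
  else if "Manual QA For Review" ∈ ys then some "Manual QA For Review"
  else if "QA Lead For Review" ∈ ys then some "QA Lead For Review"
  else if "Automation QA For Review" ∈ ys then some "Automation QA For Review"
  else if "Done" ∈ ys then some "Done" else if "On Hold" ∈ ys then some "On Hold"
  else if "Deprecated" ∈ ys then some "Deprecated"
  else if "Automation Team For Review" ∈ ys then some "Automation Team For Review"
  else none

theorem afind_eq (ys : List String) : afind ys = afindIf ys := by
  simp only [afind, pvLabels, afindIf, List.find?]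
  repeat' split <;> simp_all

-- the dict lookup as a nested conditional
def rkIf (y : String) : Option Int :=
  if "To Do" = y then some 0 else if "Doing" = y then some 1
  else if "Changes Requested" = y then some 2 else if "Manual QA For Review" = y then some 3
  else if "QA Lead For Review" = y then some 4 else if "Automation QA For Review" = y then some 5
  else if "Done" = y then some 6 else if "On Hold" = y then some 7
  else if "Deprecated" = y then some 8 else if "Automation Team For Review" = y then some 9
  else none

theorem rk_eval (y : String) : pvRank.get? y = rkIf y := by
  have h : pvRank = PySem.Dict.mk [("To Do",0),("Doing",1),("Changes Requested",2),
      ("Manual QA For Review",3),("QA Lead For Review",4),("Automation QA For Review",5),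
      ("Done",6),("On Hold",7),("Deprecated",8),("Automation Team For Review",9)] := by decide
  rw [h]
  simp only [rkIf, PySem.Dict.get?_mk_cons, beq_iff_eq]
  simp [PySem.Dict.get?]

-- the rank of A's answer
def rkOpt (o : Option String) : Option Int := o.bind pvRank.get?

theorem keyc0 (ys : List String) :
    rkOpt (afindIf ("To Do" :: ys)) = optMin (rkIf "To Do") (rkOpt (afindIf ys)) := by
  simp [afindIf, rkIf, List.mem_cons]
  try (split_ifs <;> decide)

theorem keyc1 (ys : List String) :
    rkOpt (afindIf ("Doing" :: ys)) = optMin (rkIf "Doing") (rkOpt (afindIf ys)) := by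
  simp [afindIf, rkIf, List.mem_cons]
  try (split_ifs <;> decide)

theorem keyc2 (ys : List String) :
    rkOpt (afindIf ("Changes Requested" :: ys)) = optMin (rkIf "Changes Requested") (rkOpt (afindIf ys)) := by
  simp [afindIf, rkIf, List.mem_cons]
  try (split_ifs <;> decide)

theorem keyc3 (ys : List String) :
    rkOpt (afindIf ("Manual QA For Review" :: ys)) = optMin (rkIf "Manual QA For Review") (rkOpt (afindIf ys)) := by
  simp [afindIf, rkIf, List.mem_cons]
  try (split_ifs <;> decide)

theorem keyc4 (ys : List String) :
    rkOpt (afindIf ("QA Lead For Review" :: ys)) = optMin (rkIf "QA Lead For Review") (rkOpt (afindIf ys)) := by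
  simp [afindIf, rkIf, List.mem_cons]
  try (split_ifs <;> decide)

theorem keyc5 (ys : List String) :
    rkOpt (afindIf ("Automation QA For Review" :: ys)) = optMin (rkIf "Automation QA For Review") (rkOpt (afindIf ys)) := by
  simp [afindIf, rkIf, List.mem_cons]
  try (split_ifs <;> decide)

theorem keyc6 (ys : List String) :
    rkOpt (afindIf ("Done" :: ys)) = optMin (rkIf "Done") (rkOpt (afindIf ys)) := by
  simp [afindIf, rkIf, List.mem_cons]
  try (split_ifs <;> decide)

theorem keyc7 (ys : List String) :
    rkOpt (afindIf ("On Hold" :: ys)) = optMin (rkIf "On Hold") (rkOpt (afindIf ys)) := by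
  simp [afindIf, rkIf, List.mem_cons]
  try (split_ifs <;> decide)

theorem keyc8 (ys : List String) :
    rkOpt (afindIf ("Deprecated" :: ys)) = optMin (rkIf "Deprecated") (rkOpt (afindIf ys)) := by
  simp [afindIf, rkIf, List.mem_cons]
  try (split_ifs <;> decide)

theorem keyc9 (ys : List String) :
    rkOpt (afindIf ("Automation Team For Review" :: ys)) = optMin (rkIf "Automation Team For Review") (rkOpt (afindIf ys)) := by
  simp [afindIf, rkIf, List.mem_cons]
  try (split_ifs <;> decide)

theorem keycN (y : String) (ys : List String)
    (h0 : ¬ "To Do" = y) (h1 : ¬ "Doing" = y) (h2 : ¬ "Changes Requested" = y)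
    (h3 : ¬ "Manual QA For Review" = y) (h4 : ¬ "QA Lead For Review" = y)
    (h5 : ¬ "Automation QA For Review" = y) (h6 : ¬ "Done" = y) (h7 : ¬ "On Hold" = y)
    (h8 : ¬ "Deprecated" = y) (h9 : ¬ "Automation Team For Review" = y) :
    rkOpt (afindIf (y :: ys)) = optMin (rkIf y) (rkOpt (afindIf ys)) := by
  simp [afindIf, rkIf, List.mem_cons, h0, h1, h2, h3, h4, h5, h6, h7, h8, h9, optMin_none_left]

theorem key_cons (y : String) (ys : List String) :
    rkOpt (afind (y :: ys)) = optMin (pvRank.get? y) (rkOpt (afind ys)) := by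
  rw [rk_eval, afind_eq, afind_eq]
  by_cases h0 : "To Do" = y
  · exact h0 ▸ keyc0 ys
  by_cases h1 : "Doing" = y
  · exact h1 ▸ keyc1 ys
  by_cases h2 : "Changes Requested" = y
  · exact h2 ▸ keyc2 ys
  by_cases h3 : "Manual QA For Review" = y
  · exact h3 ▸ keyc3 ys
  by_cases h4 : "QA Lead For Review" = y
  · exact h4 ▸ keyc4 ys
  by_cases h5 : "Automation QA For Review" = y
  · exact h5 ▸ keyc5 ys
  by_cases h6 : "Done" = y
  · exact h6 ▸ keyc6 ys
  by_cases h7 : "On Hold" = y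
  · exact h7 ▸ keyc7 ys
  by_cases h8 : "Deprecated" = y
  · exact h8 ▸ keyc8 ys
  by_cases h9 : "Automation Team For Review" = y
  · exact h9 ▸ keyc9 ys
  exact keycN y ys h0 h1 h2 h3 h4 h5 h6 h7 h8 h9

-- B's fold computes the rank of A's answer on the stripped labels
theorem fold_eq_rkOpt_afind (ps : List String) :
    ps.foldl pvStep none = rkOpt (afind (ps.map PySem.Str.strip)) := by
  induction ps with
  | nil => rfl
  | cons p ps ih =>
    simp only [List.foldl_cons, List.map_cons]
    rw [fold_shift, pvStep_eq, optMin_none_left, ih, key_cons]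

-- indexing back through the rank recovers A's answer
theorem idx_rkOpt (ys : List String) :
    (match rkOpt (afind ys) with
     | none => none
     | some b => some (PySem.List.pyGetD pvLabels b "")) = afind ys := by
  cases h : afind ys with
  | none => simp [rkOpt]
  | some l =>
    have hm : l ∈ pvLabels := List.mem_of_find?_eq_some h
    simp only [pvLabels, List.mem_cons, List.not_mem_nil, or_false] at hm
    rcases hm with rfl|rfl|rfl|rfl|rfl|rfl|rfl|rfl|rfl|rfl <;> rfl

-- ===== VERDICT (by name: the statement is the Claim_ definition above) =====
theorem find_relevant_label_spec : Claim_equal_find_relevant_label := by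
  unfold Claim_equal_find_relevant_label
  intro labels_str _
  unfold Spec_find_relevant_label
  cases labels_str with
  | none => rfl
  | some s =>
    simp only [find_relevant_label, find_relevant_label_alt]
    by_cases hs : s = ""
    · simp [hs]
    · simp only [hs, if_false]
      rw [fold_eq_rkOpt_afind, idx_rkOpt]
      rfl
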